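-- pv_equiv track=rewrite | github.com/Mostafa77Mahmoud/BackEnd | app/utils/text_processing.py | _skip_markers
-- ===== SOURCE A (Python) =====
-- def _skip_markers(text: str, pos: int) -> int:
--     """Skip markdown and ID markers, returning new position."""
--     while pos < len(text):
--         if text[pos:pos+2] == '[[':
--             end_bracket = text.find(']]', pos)
--             if end_bracket != -1:
--                 pos = end_bracket + 2
--                 continue
--         if text[pos:pos+2] == '**' or text[pos:pos+2] == '__':
--             pos += 2
--             continue
--         if text[pos] == '*' and (pos == 0 or text[pos-1] != '*') and (pos + 1 >= len(text) or text[pos+1] != '*'):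
--             pos += 1
--             continue
--         break
--     return pos
-- ===== SOURCE B (Python) =====
-- # Suffix-consuming rewrite: instead of index arithmetic over the whole string, it
-- # peels the current suffix, tracking one boolean (was the previous char a '*').
-- def _after_close(cs):
--     i = cs.find(']]')
--     return None if i == -1 else cs[i + 2:]
--
-- def _skip_markers(text: str, pos: int) -> int:
--     n = len(text)
--     if pos >= n:
--         return pos
--     cs = text[pos:]
--     prev_star = pos > 0 and text[pos - 1] == '*'
--     while cs:
--         if cs.startswith('[['):
--             rest = _after_close(cs)
--             if rest is None:
--                 break
--             cs, prev_star = rest, False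
--         elif cs.startswith('**') or cs.startswith('__'):
--             cs, prev_star = cs[2:], cs[0] == '*'
--         elif cs[0] == '*' and not prev_star:
--             cs, prev_star = cs[1:], True
--         else:
--             break
--     return n - len(cs)
-- ===== Notes on version B (the rewrite author's own statement) =====
-- stated objective: alternative
-- what changed: Replaces A's index-arithmetic loop over the whole string (re-slicing text[pos:pos+2] and guarding the lone-* branch with pos==0/text[pos-1]/text[pos+1] checks) by a loop that consumes the current suffix string with startswith/find and a single carried boolean 'previous char was *', returning len(text) minus the leftover suffix.
-- outside the precondition, e.g. on _skip_markers('xx**', -2): A returns -2, B returns 4; on _skip_markers('**a', -3): A returns -1, B returns 2; on _skip_markers('*a', -2): A raises IndexError, B returns 1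
import Mathlib
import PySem

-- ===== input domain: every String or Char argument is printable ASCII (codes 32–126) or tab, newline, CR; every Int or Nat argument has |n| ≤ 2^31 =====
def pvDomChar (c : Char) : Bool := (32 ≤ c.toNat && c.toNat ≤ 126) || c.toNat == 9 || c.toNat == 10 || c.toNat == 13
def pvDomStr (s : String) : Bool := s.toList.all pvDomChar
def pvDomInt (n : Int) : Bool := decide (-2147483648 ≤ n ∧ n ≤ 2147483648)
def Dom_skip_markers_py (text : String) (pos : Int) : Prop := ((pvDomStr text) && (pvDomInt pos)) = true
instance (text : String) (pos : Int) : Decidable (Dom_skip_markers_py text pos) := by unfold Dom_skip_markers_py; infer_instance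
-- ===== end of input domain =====

-- B replaces A's index-arithmetic loop by a suffix-consuming loop carrying one boolean
-- ('previous char was *'); an alternative of the same asymptotic cost (return value only).

-- ===== PORT A =====
-- A's while loop as a fuel recursion; fuel = len(text)+1 suffices on Pre_ (pos ≥ 0):
-- every iteration strictly increases pos, which stays < len(text) while looping.
-- Primitives are PySem.Chars.* applied to text.toList (PySem.Str.f s = PySem.Chars.f s.toList).
def skipALoop (s : List Char) : Nat → Int → Int
  | 0, pos => pos
  | fuel+1, pos =>
    if pos < PySem.Chars.len s then
      -- if text[pos:pos+2] == '[[' and text.find(']]', pos) != -1: pos = find+2; continue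
      if PySem.Chars.slice s (some pos) (some (pos+2)) = ['[','['] ∧
         PySem.Chars.findFrom s [']',']'] pos ≠ -1 then
        skipALoop s fuel (PySem.Chars.findFrom s [']',']'] pos + 2)
      -- if text[pos:pos+2] == '**' or text[pos:pos+2] == '__': pos += 2; continue
      else if PySem.Chars.slice s (some pos) (some (pos+2)) = ['*','*'] ∨
              PySem.Chars.slice s (some pos) (some (pos+2)) = ['_','_'] then
        skipALoop s fuel (pos + 2)
      -- if text[pos] == '*' and (pos == 0 or text[pos-1] != '*') and (pos+1 >= len or text[pos+1] != '*'):
      else if PySem.List.pyGet? s pos = some '*' ∧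
              (pos = 0 ∨ PySem.List.pyGet? s (pos - 1) ≠ some '*') ∧
              (PySem.Chars.len s ≤ pos + 1 ∨ PySem.List.pyGet? s (pos + 1) ≠ some '*') then
        skipALoop s fuel (pos + 1)
      else pos
    else pos

def skip_markers_py (text : String) (pos : Int) : Int :=
  skipALoop text.toList (text.toList.length + 1) pos

-- ===== PORT B =====
-- def _after_close(cs): i = cs.find(']]'); return None if i == -1 else cs[i+2:]
def afterClose (cs : List Char) : Option (List Char) :=
  let i := PySem.Chars.find cs [']',']']
  if i = -1 then none else some (PySem.Chars.slice cs (some (i + 2)))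

-- B's while loop over the shrinking suffix; fuel = len(cs)+1 suffices (cs shrinks each step).
def skipBLoop : Nat → List Char → Bool → List Char
  | 0, cs, _ => cs
  | fuel+1, cs, prevStar =>
    if cs = [] then cs
    else if PySem.Chars.startswith cs ['[','['] then
      match afterClose cs with
      | none => cs
      | some rest => skipBLoop fuel rest false
    else if PySem.Chars.startswith cs ['*','*'] || PySem.Chars.startswith cs ['_','_'] then
      skipBLoop fuel (PySem.Chars.slice cs (some 2)) (PySem.List.pyGet? cs 0 == some '*')
    else if PySem.List.pyGet? cs 0 == some '*' && !prevStar then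
      skipBLoop fuel (PySem.Chars.slice cs (some 1)) true
    else cs

def skip_markers_py_alt (text : String) (pos : Int) : Int :=
  let s := text.toList
  let n := PySem.Chars.len s
  if n ≤ pos then pos
  else
    let cs := PySem.Chars.slice s (some pos)
    let prevStar := decide (0 < pos) && (PySem.List.pyGet? s (pos - 1) == some '*')
    n - PySem.Chars.len (skipBLoop (cs.length + 1) cs prevStar)

-- ===== PRECONDITION & SPEC =====
-- Pre_ excludes negative positions, outside this position-skipping helper's natural domain:
-- there A either raises IndexError (pos < -len(text), or pos = -len(text) on a leading
-- un-doubled '*') or returns a value shaped by Python's negative slice/index wraparound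
-- (text[pos:pos+2] silently clamping to '' near the end), which B does not reproduce.
def Pre_skip_markers_py (text : String) (pos : Int) : Prop := 0 ≤ pos
instance (text : String) (pos : Int) : Decidable (Pre_skip_markers_py text pos) := by
  unfold Pre_skip_markers_py; infer_instance

def pvWitness_skip_markers_py : String × Int := ("**[[id]]*x", 0)

def Spec_skip_markers_py (text : String) (pos : Int) (out : Int) : Prop := out = skip_markers_py_alt text pos
instance (text : String) (pos : Int) (out : Int) : Decidable (Spec_skip_markers_py text pos out) := by unfold Spec_skip_markers_py; infer_instance

-- ===== CLAIM (what is proved, stated in full; the proofs are below) =====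
def Claim_equal_skip_markers_py : Prop := ∀ (text : String) (pos : Int), Dom_skip_markers_py text pos → Pre_skip_markers_py text pos → Spec_skip_markers_py text pos (skip_markers_py text pos)

-- ===== LEMMAS AND PROOFS =====
lemma take_two_of_prefix {a b : Char} {t : List Char} (h : [a, b] <+: t) :
    t.take 2 = [a, b] := by
  have := List.prefix_iff_eq_take.mp h
  simpa using this.symm

lemma startswith_take2 (t : List Char) (a b : Char) :
    PySem.Chars.startswith t [a, b] = true ↔ t.take 2 = [a, b] := by
  rw [PySem.Chars.startswith_iff]
  constructor
  · exact take_two_of_prefix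
  · intro h; rw [← h]; exact List.take_prefix 2 t

lemma cons_cons_of_take2 {a b : Char} {t : List Char} (h : t.take 2 = [a, b]) :
    t = a :: b :: t.drop 2 := by
  conv_lhs => rw [← List.take_append_drop 2 t, h]
  rfl

lemma take2_of_getElem? {a b : Char} {t : List Char}
    (h0 : t[0]? = some a) (h1 : t[1]? = some b) : t.take 2 = [a, b] := by
  cases t with
  | nil => simp at h0
  | cons x u =>
    cases u with
    | nil => simp at h1
    | cons y v => simp at h0 h1; simp [h0, h1]

lemma find_spec {t sub : List Char} (h : PySem.Chars.find t sub ≠ -1) :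
    0 ≤ PySem.Chars.find t sub ∧ sub <+: t.drop (PySem.Chars.find t sub).toNat := by
  have h0 := PySem.Chars.findFrom_natCast_spec t sub 0 (Nat.zero_le _)
  simp only [Nat.cast_zero, PySem.Chars.findFrom_zero] at h0
  exact ⟨(h0 h).1, (h0 h).2.1⟩

lemma loop_eq (s : List Char) (fa : Nat) :
    ∀ (fb k : Nat) (ps : Bool), k ≤ s.length →
      s.length - k < fa → s.length - k < fb →
      ps = (decide (0 < k) && (s[k-1]? == some '*')) →
      skipALoop s fa (k : Int) = (s.length : Int) - ((skipBLoop fb (s.drop k) ps).length : Int) := by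
  induction fa with
  | zero => intro fb k ps hk hfa hfb hps; omega
  | succ fa ih =>
    intro fb k ps hk hfa hfb hps
    obtain ⟨fb, rfl⟩ : ∃ m, fb = m + 1 := ⟨fb - 1, by omega⟩
    by_cases hkn : k < s.length
    case neg =>
      have hk' : k = s.length := by omega
      subst hk'
      rw [skipALoop, skipBLoop]
      simp [PySem.Chars.len_eq, List.drop_length]
    case pos =>
    -- one iteration of each loop, over the suffix t = s.drop k
    have hlen_t : (s.drop k).length = s.length - k := List.length_drop
    set t : List Char := s.drop k with ht
    have hne : t ≠ [] := by
      intro h0; rw [h0] at hlen_t; simp at hlen_t; omega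
    have hslice : PySem.Chars.slice s (some (k : Int)) (some ((k : Int) + 2)) = t.take 2 := by
      rw [PySem.Chars.slice_eq_listSlice]
      have h1 := PySem.List.slice_natCast_add s k 2
      norm_num at h1
      rw [h1, ht]
    have hff : PySem.Chars.findFrom s [']',']'] (k : Int) =
        if PySem.Chars.find t [']',']'] = -1 then -1
        else (k : Int) + PySem.Chars.find t [']',']'] := by
      have h2 := PySem.Chars.findFrom_natCast s [']',']'] k hk
      rw [h2, ht]
    have hget0 : PySem.List.pyGet? s (k : Int) = t[0]? := by
      rw [PySem.List.pyGet?_natCast, ht, List.getElem?_drop]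
      simp
    rw [skipALoop, skipBLoop]
    rw [if_pos (show (k : Int) < PySem.Chars.len s by
          rw [PySem.Chars.len_eq]; exact_mod_cast hkn),
        if_neg hne]
    by_cases hbr : t.take 2 = ['[','[']
    · -- suffix starts with '[['
      rw [if_pos ((startswith_take2 t '[' '[').mpr hbr)]
      have ht0 : t[0]? = some '[' := by rw [cons_cons_of_take2 hbr]; rfl
      by_cases hfind : PySem.Chars.find t [']',']'] = -1
      · -- no closing ']]': both loops stop here (A falls through its other branches)
        have hac : afterClose t = none := by
          simp [afterClose, hfind]
        rw [if_neg (show ¬ (PySem.Chars.slice s (some (k:Int)) (some ((k:Int)+2)) = ['[','['] ∧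
              PySem.Chars.findFrom s [']',']'] (k:Int) ≠ -1) by
            rw [hff, if_pos hfind]; simp)]
        rw [if_neg (show ¬ (PySem.Chars.slice s (some (k:Int)) (some ((k:Int)+2)) = ['*','*'] ∨
              PySem.Chars.slice s (some (k:Int)) (some ((k:Int)+2)) = ['_','_']) by
            rw [hslice, hbr]; simp)]
        rw [if_neg (show ¬ (PySem.List.pyGet? s (k:Int) = some '*' ∧
              ((k:Int) = 0 ∨ PySem.List.pyGet? s ((k:Int) - 1) ≠ some '*') ∧
              (PySem.Chars.len s ≤ (k:Int) + 1 ∨ PySem.List.pyGet? s ((k:Int) + 1) ≠ some '*')) by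
            rw [hget0, ht0]; simp)]
        rw [hac]
        have := hlen_t
        push_cast
        omega
      · -- closing ']]' found at index i = find t ']]': both jump past it
        obtain ⟨hi0, hipre⟩ := find_spec hfind
        set i : Int := PySem.Chars.find t [']',']'] with hi
        set m : Nat := i.toNat with hm
        have him : i = (m : Int) := by omega
        have hdropm : t.drop m = ']' :: ']' :: (t.drop m).drop 2 :=
          cons_cons_of_take2 (take_two_of_prefix hipre)
        have hm2 : m + 2 ≤ t.length := by
          have h2 := congrArg List.length hdropm
          simp only [List.length_drop, List.length_cons] at h2
          omega
        rw [if_pos (show (PySem.Chars.slice s (some (k:Int)) (some ((k:Int)+2)) = ['[','['] ∧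
              PySem.Chars.findFrom s [']',']'] (k:Int) ≠ -1) by
            refine ⟨by rw [hslice, hbr], ?_⟩
            rw [hff, if_neg hfind]; omega)]
        have hac : afterClose t = some (PySem.Chars.slice t (some (i + 2))) := by
          simp only [afterClose, ← hi]
          rw [if_neg (by omega)]
        rw [hac]
        have hjump : PySem.Chars.findFrom s [']',']'] (k:Int) + 2 = ((k + m + 2 : Nat) : Int) := by
          rw [hff, if_neg hfind]
          push_cast
          omega
        have hrest : PySem.Chars.slice t (some (i + 2)) = s.drop (k + m + 2) := by
          rw [PySem.Chars.slice_eq_listSlice, PySem.List.slice_from t (by omega)]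
          have h3 : (i + 2).toNat = m + 2 := by omega
          rw [h3, ht, List.drop_drop]
          congr 1
        have hps' : (false : Bool) = (decide (0 < k + m + 2) && (s[k + m + 2 - 1]? == some '*')) := by
          have h1 : t[m + 1]? = some ']' := by
            have h4 : (t.drop m)[1]? = t[m + 1]? := List.getElem?_drop
            rw [hdropm] at h4
            simpa using h4.symm
          have h5 : s[k + m + 2 - 1]? = some ']' := by
            have h6 : t[m + 1]? = s[k + (m + 1)]? := List.getElem?_drop
            rw [h1] at h6
            rw [show k + m + 2 - 1 = k + (m + 1) by omega, ← h6]
          rw [h5]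
          simp
        rw [hjump, hrest]
        exact ih fb (k + m + 2) false (by omega) (by omega) (by omega) hps'
    · -- suffix does not start with '[['
      rw [if_neg (show ¬ (PySem.Chars.slice s (some (k:Int)) (some ((k:Int)+2)) = ['[','['] ∧
            PySem.Chars.findFrom s [']',']'] (k:Int) ≠ -1) by
          rw [hslice]; intro h; exact hbr h.1)]
      rw [if_neg (show ¬ PySem.Chars.startswith t ['[','['] = true from
            fun h => hbr ((startswith_take2 t '[' '[').mp h))]
      by_cases hstar : t.take 2 = ['*','*'] ∨ t.take 2 = ['_','_']
      · -- a '**' or '__' marker: both advance by 2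
        obtain ⟨c, hc, htu⟩ : ∃ c, (c = '*' ∨ c = '_') ∧ t = c :: c :: t.drop 2 := by
          rcases hstar with h | h
          · exact ⟨'*', Or.inl rfl, cons_cons_of_take2 h⟩
          · exact ⟨'_', Or.inr rfl, cons_cons_of_take2 h⟩
        have hlt2 : 2 ≤ t.length := by
          conv_rhs => rw [htu]
          simp
        rw [if_pos (show (PySem.Chars.slice s (some (k:Int)) (some ((k:Int)+2)) = ['*','*'] ∨
              PySem.Chars.slice s (some (k:Int)) (some ((k:Int)+2)) = ['_','_']) by
            rw [hslice]; exact hstar)]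
        rw [if_pos (show (PySem.Chars.startswith t ['*','*'] || PySem.Chars.startswith t ['_','_']) = true by
            rcases hstar with h | h
            · simp [startswith_take2, h]
            · simp [startswith_take2, h])]
        have hrest : PySem.Chars.slice t (some 2) = s.drop (k + 2) := by
          rw [PySem.Chars.slice_eq_listSlice, PySem.List.slice_from t (by omega)]
          rw [show ((2:Int)).toNat = 2 from rfl, ht, List.drop_drop]
        have hps' : (PySem.List.pyGet? t 0 == some '*') =
            (decide (0 < k + 2) && (s[k + 2 - 1]? == some '*')) := by
          have h1 : s[k + 1]? = some c := by
            have h6 : t[1]? = s[k + 1]? := List.getElem?_drop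
            conv_lhs at h6 => rw [htu]
            exact h6.symm
          have h0 : PySem.List.pyGet? t 0 = some c := by
            rw [show (0:Int) = ((0:Nat):Int) from rfl, PySem.List.pyGet?_natCast]
            conv_lhs => rw [htu]
            rfl
          rw [show k + 2 - 1 = k + 1 by omega, h1, h0]
          simp
        have hjump : (k : Int) + 2 = ((k + 2 : Nat) : Int) := by push_cast; ring
        rw [hjump, hrest, hps']
        exact ih fb (k + 2) _ (by omega) (by omega) (by omega) rfl
      · -- neither pair marker: maybe a lone '*', else both stop
        push Not at hstar
        rw [if_neg (show ¬ (PySem.Chars.slice s (some (k:Int)) (some ((k:Int)+2)) = ['*','*'] ∨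
              PySem.Chars.slice s (some (k:Int)) (some ((k:Int)+2)) = ['_','_']) by
            rw [hslice]; exact not_or.mpr hstar)]
        rw [if_neg (show ¬ (PySem.Chars.startswith t ['*','*'] || PySem.Chars.startswith t ['_','_']) = true by
            simp only [Bool.or_eq_true, startswith_take2]
            exact not_or.mpr hstar)]
        have hget00 : PySem.List.pyGet? t 0 = t[0]? := by
          rw [show (0:Int) = ((0:Nat):Int) from rfl, PySem.List.pyGet?_natCast]
        have hget1 : t[1]? = s[k + 1]? := List.getElem?_drop
        by_cases hB : (PySem.List.pyGet? t 0 == some '*' && !ps) = true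
        · -- lone '*': both advance by 1
          simp only [Bool.and_eq_true, beq_iff_eq, Bool.not_eq_eq_eq_not, Bool.not_true] at hB
          obtain ⟨ht0', hps0⟩ := hB
          have ht0 : t[0]? = some '*' := by rw [← hget00]; exact ht0'
          rw [if_pos (show (PySem.List.pyGet? s (k:Int) = some '*' ∧
                ((k:Int) = 0 ∨ PySem.List.pyGet? s ((k:Int) - 1) ≠ some '*') ∧
                (PySem.Chars.len s ≤ (k:Int) + 1 ∨ PySem.List.pyGet? s ((k:Int) + 1) ≠ some '*')) by
              refine ⟨by rw [hget0]; exact ht0, ?_, ?_⟩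
              · rcases Nat.eq_zero_or_pos k with hk0 | hk0
                · subst hk0; exact Or.inl rfl
                · refine Or.inr ?_
                  have hcast : ((k:Int) - 1) = ((k - 1 : Nat) : Int) := by push_cast [hk0]; ring
                  rw [hcast, PySem.List.pyGet?_natCast]
                  have h9 : (decide (0 < k) && (s[k-1]? == some '*')) = false := by
                    rw [← hps, hps0]
                  rw [Bool.and_eq_false_iff] at h9
                  rcases h9 with h | h
                  · simp [hk0] at h
                  · simpa using h
              · rcases Nat.lt_or_ge (k+1) s.length with hk1 | hk1
                · refine Or.inr ?_
                  have hcast : ((k:Int) + 1) = ((k + 1 : Nat) : Int) := by push_cast; ring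
                  rw [hcast, PySem.List.pyGet?_natCast]
                  intro hstar1
                  exact hstar.1 (take2_of_getElem? ht0 (hget1.trans hstar1))
                · exact Or.inl (by rw [PySem.Chars.len_eq]; exact_mod_cast hk1))]
          rw [if_pos (show (PySem.List.pyGet? t 0 == some '*' && !ps) = true by
              simp [ht0', hps0])]
          have hrest : PySem.Chars.slice t (some 1) = s.drop (k + 1) := by
            rw [PySem.Chars.slice_eq_listSlice, PySem.List.slice_from t (by omega)]
            rw [show ((1:Int)).toNat = 1 from rfl, ht, List.drop_drop]
          have hps' : (true : Bool) = (decide (0 < k + 1) && (s[k + 1 - 1]? == some '*')) := by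
            have h7 : s[k]? = some '*' := by
              have h8 : t[0]? = s[k + 0]? := List.getElem?_drop
              rw [ht0] at h8
              simpa using h8.symm
            rw [show k + 1 - 1 = k by omega, h7]
            simp
          have hjump : (k : Int) + 1 = ((k + 1 : Nat) : Int) := by push_cast; ring
          rw [hjump, hrest]
          exact ih fb (k + 1) true (by omega) (by omega) (by omega) hps'
        · -- both loops stop
          rw [if_neg hB]
          rw [if_neg (show ¬ (PySem.List.pyGet? s (k:Int) = some '*' ∧
                ((k:Int) = 0 ∨ PySem.List.pyGet? s ((k:Int) - 1) ≠ some '*') ∧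
                (PySem.Chars.len s ≤ (k:Int) + 1 ∨ PySem.List.pyGet? s ((k:Int) + 1) ≠ some '*')) by
              rintro ⟨c1, c2, c3⟩
              apply hB
              have ht0' : PySem.List.pyGet? t 0 = some '*' := by
                rw [hget00, ← hget0]; exact c1
              have hps0 : ps = false := by
                rcases Nat.eq_zero_or_pos k with hk0 | hk0
                · rw [hps]; subst hk0; simp
                · rcases c2 with h | h
                  · exfalso; omega
                  · have hcast : ((k:Int) - 1) = ((k - 1 : Nat) : Int) := by push_cast [hk0]; ring
                    rw [hcast, PySem.List.pyGet?_natCast] at h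
                    rw [hps]
                    simp [h]
              simp [ht0', hps0])]
          have := hlen_t
          omega

-- ===== VERDICT (by name: the statement is the Claim_ definition above) =====
theorem skip_markers_py_spec : Claim_equal_skip_markers_py := by
  unfold Claim_equal_skip_markers_py
  intro text pos _ hpre
  have hpre' : (0:Int) ≤ pos := hpre
  unfold Spec_skip_markers_py skip_markers_py skip_markers_py_alt
  dsimp only
  by_cases hlen : PySem.Chars.len text.toList ≤ pos
  · rw [if_pos hlen, skipALoop, if_neg (not_lt.mpr hlen)]
  · rw [if_neg hlen]
    push Not at hlen
    obtain ⟨k, rfl⟩ : ∃ k : Nat, pos = (k:Int) := ⟨pos.toNat, (Int.toNat_of_nonneg hpre').symm⟩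
    have hkn : k < text.toList.length := by
      rw [PySem.Chars.len_eq] at hlen; exact_mod_cast hlen
    have hcs : PySem.Chars.slice text.toList (some (k:Int)) = text.toList.drop k := by
      rw [PySem.Chars.slice_eq_listSlice, PySem.List.slice_from _ (by exact_mod_cast Int.natCast_nonneg k)]
      simp
    have hps : (decide (0 < (k:Int)) && (PySem.List.pyGet? text.toList ((k:Int) - 1) == some '*'))
        = (decide (0 < k) && (text.toList[k-1]? == some '*')) := by
      rcases Nat.eq_zero_or_pos k with hk0 | hk0
      · subst hk0; simp
      · have hcast : ((k:Int) - 1) = ((k - 1 : Nat) : Int) := by push_cast [hk0]; ring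
        rw [hcast, PySem.List.pyGet?_natCast]
        congr 1
        simp [hk0]
    rw [hcs, hps, PySem.Chars.len_eq]
    have hmain := loop_eq text.toList (text.toList.length + 1)
        ((text.toList.drop k).length + 1) k
        (decide (0 < k) && (text.toList[k-1]? == some '*'))
        (le_of_lt hkn) (by omega) (by rw [List.length_drop]; omega) rfl
    rw [PySem.Chars.len_eq, hmain]
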